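-- pv_equiv track=rewrite | github.com/siroba/SumSquares | main.py | get_nth
-- ===== SOURCE A (Python) =====
-- def get_nth(X, Y, i=0, count=0):
--     if i >= len(Y) or count > X:
--         return ''
--
--     if Y[i] == ' ':
--         count += 1
--
--     if count == X:
--         return Y[i] + get_nth(X, Y, i=i + 1, count=count)
--
--     return get_nth(X, Y, i=i + 1, count=count)
-- ===== SOURCE B (Python) =====
-- def get_nth(X, Y, i=0, count=0):
--     parts = []
--     if count <= X:
--         for j in range(i, len(Y)):
--             if Y[j] == ' ':
--                 count += 1
--             if count > X:
--                 break
--             if count == X: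
--                 parts.append(Y[j])
--     return ''.join(parts)
-- ===== Notes on version B (the rewrite author's own statement) =====
-- stated objective: simpler
-- what changed: Replaces A's flat recursion (one call frame per character, building the string by repeated front concatenation) with a guarded for-loop over range(i, len(Y)) that appends matching characters to a list joined once at the end, breaking once the space count exceeds X.
import Mathlib
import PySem

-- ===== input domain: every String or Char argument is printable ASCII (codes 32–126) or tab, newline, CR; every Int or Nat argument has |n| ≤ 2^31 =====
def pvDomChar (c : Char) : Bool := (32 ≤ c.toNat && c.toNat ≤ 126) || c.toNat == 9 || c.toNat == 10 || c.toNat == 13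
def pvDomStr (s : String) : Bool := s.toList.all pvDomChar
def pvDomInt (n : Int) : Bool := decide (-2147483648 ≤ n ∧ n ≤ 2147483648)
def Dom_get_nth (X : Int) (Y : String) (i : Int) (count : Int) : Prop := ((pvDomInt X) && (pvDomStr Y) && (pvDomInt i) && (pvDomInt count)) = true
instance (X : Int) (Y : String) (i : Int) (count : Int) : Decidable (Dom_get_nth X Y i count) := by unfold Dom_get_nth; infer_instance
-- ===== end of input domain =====

-- B replaces A's flat recursion by one for-loop over the index range with a result accumulator (objective: simpler).

-- ===== PORT A =====
-- A's recursion, step for step, over the code points of Y; the Int index i may be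
-- negative (Python wraparound via pyGet?); pyGet? = none is where Python raises
-- IndexError (excluded by Pre_), the port returns "" there.
def getNthRecA (X : Int) (L : List Char) (i : Int) (count : Int) : List Char :=
  if h : i ≥ (L.length : Int) ∨ count > X then [] else
  match PySem.List.pyGet? L i with
  | none => []
  | some c =>
    let count' := if c = ' ' then count + 1 else count
    if count' = X then c :: getNthRecA X L (i + 1) count'
    else getNthRecA X L (i + 1) count'
termination_by ((L.length : Int) - i).toNat
decreasing_by all_goals (rw [not_or, not_le, not_lt] at h; omega)

def get_nth (X : Int) (Y : String) (i : Int) (count : Int) : String :=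
  String.ofList (getNthRecA X Y.toList i count)

-- ===== PORT B =====
-- Source B's for-loop body; state = (count, parts, done) where done models 'break'.
def getNthStepB (X : Int) (L : List Char) (st : Int × List Char × Bool) (j : Int) :
    Int × List Char × Bool :=
  if st.2.2 then st
  else
    match PySem.List.pyGet? L j with
    | none => (st.1, st.2.1, true)   -- Python raises IndexError here (outside Pre_)
    | some c =>
      let count' := if c = ' ' then st.1 + 1 else st.1
      if count' > X then (count', st.2.1, true)
      else (count', if count' = X then st.2.1 ++ [c] else st.2.1, false)

-- Source B: the loop runs only when count ≤ X; the accumulated parts list is joined at the end.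
def get_nth_alt (X : Int) (Y : String) (i : Int) (count : Int) : String :=
  String.ofList (if count ≤ X then
    ((PySem.List.pyRange i (Y.toList.length : Int) 1).foldl
      (getNthStepB X Y.toList) (count, [], false)).2.1
  else [])

-- ===== PRECONDITION & SPEC =====
-- Pre_ excludes exactly the inputs where Python A raises IndexError: the first index
-- access Y[i] with i < -len(Y) (reached only when count ≤ X). A returns on all other inputs.
def Pre_get_nth (X : Int) (Y : String) (i : Int) (count : Int) : Prop :=
  -(Y.toList.length : Int) ≤ i ∨ X < count
instance (X : Int) (Y : String) (i : Int) (count : Int) : Decidable (Pre_get_nth X Y i count) := by unfold Pre_get_nth; infer_instance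

def pvWitness_get_nth : Int × String × Int × Int := (1, " sum of squares", 0, 0)

def Spec_get_nth (X : Int) (Y : String) (i : Int) (count : Int) (out : String) : Prop := out = get_nth_alt X Y i count
instance (X : Int) (Y : String) (i : Int) (count : Int) (out : String) : Decidable (Spec_get_nth X Y i count out) := by unfold Spec_get_nth; infer_instance

-- ===== CLAIM =====
def Claim_equal_get_nth : Prop := ∀ (X : Int) (Y : String) (i : Int) (count : Int), Dom_get_nth X Y i count → Pre_get_nth X Y i count → Spec_get_nth X Y i count (get_nth X Y i count)

-- ===== LEMMAS AND PROOFS =====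

-- Once the done flag is set, the fold is inert.
theorem foldB_done (X : Int) (L : List Char) (js : List Int) (c : Int) (acc : List Char) :
    js.foldl (getNthStepB X L) (c, acc, true) = (c, acc, true) := by
  induction js with
  | nil => rfl
  | cons j js ih => simpa [getNthStepB] using ih

-- Loop invariant: for count ≤ X, the fold over range(i, len L) computes acc ++ A's result.
theorem foldB_eq (X : Int) (L : List Char) (i : Int) (c : Int) (acc : List Char) (hcX : c ≤ X) :
    ((PySem.List.pyRange i (L.length : Int) 1).foldl (getNthStepB X L) (c, acc, false)).2.1
      = acc ++ getNthRecA X L i c := by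
  by_cases hi : i ≥ (L.length : Int)
  · rw [PySem.List.pyRange_one_eq_nil hi, getNthRecA]
    simp [hi]
  · rw [not_le] at hi
    rw [PySem.List.pyRange_one_cons hi, List.foldl_cons, getNthRecA]
    have hcond : ¬ (i ≥ (L.length : Int) ∨ c > X) := by omega
    rw [dif_neg hcond]
    cases hg : PySem.List.pyGet? L i with
    | none =>
      simp only [getNthStepB, Bool.false_eq_true, if_false, hg]
      rw [foldB_done]
      simp
    | some ch =>
      simp only [getNthStepB, Bool.false_eq_true, if_false, hg]
      by_cases hgt : (if ch = ' ' then c + 1 else c) > X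
      · rw [if_pos hgt, foldB_done]
        have hrec : getNthRecA X L (i + 1) (if ch = ' ' then c + 1 else c) = [] := by
          rw [getNthRecA]; exact dif_pos (Or.inr hgt)
        have hx : ¬ (if ch = ' ' then c + 1 else c) = X := by omega
        simp [hx, hrec]
      · rw [if_neg hgt]
        have ih := foldB_eq X L (i + 1) (if ch = ' ' then c + 1 else c)
          (if (if ch = ' ' then c + 1 else c) = X then acc ++ [ch] else acc) (by omega)
        by_cases hx : (if ch = ' ' then c + 1 else c) = X
        · simp only [hx, if_true] at ih ⊢
          rw [ih]; simp
        · simp only [if_neg hx] at ih ⊢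
          rw [ih]
termination_by ((L.length : Int) - i).toNat
decreasing_by all_goals omega

-- ===== VERDICT =====
theorem get_nth_spec : Claim_equal_get_nth := by
  intro X Y i count _ _
  unfold Spec_get_nth get_nth get_nth_alt
  by_cases hc : count ≤ X
  · rw [if_pos hc, foldB_eq X Y.toList i count [] hc]
    simp
  · rw [if_neg hc, getNthRecA, dif_pos (Or.inr (by omega))]
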